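-- pv_equiv track=rewrite | github.com/Crayflee/AOC | Day-4/Day4.py | calculate_card_points
-- ===== SOURCE A (Python) =====
-- def calculate_card_points(winning_numbers, nums_to_check):
--     matches = 0
--     points = 0
--
--     # Convert the lists to sets to check for matches
--     winning_set = set(winning_numbers)
--     for num in nums_to_check:
--         if num in winning_set:
--             matches += 1
--             if matches == 1:
--                 points += 1  # First match gives 1 point
--             else:
--                 points *= 2  # Each subsequent match doubles the points
--
--     return points
-- ===== SOURCE B (Python) =====
-- def calculate_card_points(winning_numbers, nums_to_check):
--     winning = set(winning_numbers)
--     count = sum(1 for n in nums_to_check if n in winning)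
--     return 2 ** (count - 1) if count else 0
-- ===== Notes on version B (the rewrite author's own statement) =====
-- stated objective: simpler
-- what changed: Replaces the stateful doubling loop (matches counter plus in-loop points branching) by a single membership count followed by the closed form 2**(count-1), with 0 when there are no matches.
import Mathlib
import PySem

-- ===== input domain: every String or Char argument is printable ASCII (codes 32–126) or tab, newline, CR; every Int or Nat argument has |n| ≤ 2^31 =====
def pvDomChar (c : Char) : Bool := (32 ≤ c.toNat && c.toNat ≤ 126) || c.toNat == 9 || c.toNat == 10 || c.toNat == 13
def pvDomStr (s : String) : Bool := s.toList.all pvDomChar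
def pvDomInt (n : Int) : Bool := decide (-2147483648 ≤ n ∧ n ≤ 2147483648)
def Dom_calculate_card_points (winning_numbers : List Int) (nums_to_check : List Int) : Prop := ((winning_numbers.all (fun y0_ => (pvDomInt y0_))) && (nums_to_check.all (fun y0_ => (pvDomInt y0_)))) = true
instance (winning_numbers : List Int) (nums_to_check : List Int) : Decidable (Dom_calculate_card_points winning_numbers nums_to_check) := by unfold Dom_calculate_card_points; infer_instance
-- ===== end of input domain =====

-- B replaces A's stateful doubling loop by one membership count and the closed form 2^(count-1) (0 when count = 0); objective: simpler.

-- ===== PORT A =====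
def calculate_card_points (winning_numbers : List Int) (nums_to_check : List Int) : Int :=
  let winning_set : PySem.Set Int := PySem.Set.ofList winning_numbers
  let st := nums_to_check.foldl
    (fun (st : Int × Int) num =>
      if PySem.Set.contains winning_set num then
        let m_ := st.1 + 1  -- Python local "matches"
        if m_ == 1 then (m_, st.2 + 1) else (m_, st.2 * 2)
      else st)
    (0, 0)
  st.2

-- ===== PORT B =====
def calculate_card_points_alt (winning_numbers : List Int) (nums_to_check : List Int) : Int :=
  let winning : PySem.Set Int := PySem.Set.ofList winning_numbers
  let count : Nat := nums_to_check.countP (fun n => PySem.Set.contains winning n)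
  if count ≠ 0 then (2 : Int) ^ (count - 1) else 0

-- ===== PRECONDITION & SPEC =====
def Spec_calculate_card_points (winning_numbers : List Int) (nums_to_check : List Int) (out : Int) : Prop := out = calculate_card_points_alt winning_numbers nums_to_check
instance (winning_numbers : List Int) (nums_to_check : List Int) (out : Int) : Decidable (Spec_calculate_card_points winning_numbers nums_to_check out) := by unfold Spec_calculate_card_points; infer_instance

-- ===== CLAIM (what is proved, stated in full; the proofs are below) =====
def Claim_equal_calculate_card_points : Prop := ∀ (winning_numbers : List Int) (nums_to_check : List Int), Dom_calculate_card_points winning_numbers nums_to_check → Spec_calculate_card_points winning_numbers nums_to_check (calculate_card_points winning_numbers nums_to_check)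

-- ===== LEMMAS AND PROOFS =====

-- points as a function of the match count
def pvPts (k : Nat) : Int := if k ≠ 0 then (2 : Int) ^ (k - 1) else 0

-- loop invariant: starting from state (k, pvPts k), A's fold ends at (k + countP, pvPts (k + countP))
theorem pvLoop (p : Int → Bool) (l : List Int) (k : Nat) :
    l.foldl
      (fun (st : Int × Int) num =>
        if p num then
          let m_ := st.1 + 1
          if m_ == 1 then (m_, st.2 + 1) else (m_, st.2 * 2)
        else st)
      ((k : Int), pvPts k)
    = (((k + l.countP p : Nat) : Int), pvPts (k + l.countP p)) := by
  induction l generalizing k with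
  | nil => simp
  | cons a t ih =>
    simp only [List.foldl_cons, List.countP_cons]
    by_cases hp : p a
    · have hstep :
          (if p a then
            let m_ := ((k : Int), pvPts k).1 + 1
            if m_ == 1 then (m_, ((k : Int), pvPts k).2 + 1) else (m_, ((k : Int), pvPts k).2 * 2)
          else ((k : Int), pvPts k)) = (((k + 1 : Nat) : Int), pvPts (k + 1)) := by
        rw [if_pos hp]
        cases k with
        | zero => norm_num [pvPts]
        | succ m =>
          have hne : ¬ ((((m + 1 : Nat) : Int) + 1) == 1) = true := by
            simp only [beq_iff_eq]
            push_cast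
            omega
          rw [if_neg hne]
          have h2 : pvPts (m + 1) * 2 = pvPts (m + 1 + 1) := by
            simp [pvPts, pow_succ]
          rw [h2]
          simp only [Prod.mk.injEq]
          refine ⟨by push_cast; ring, trivial⟩
      rw [hstep, ih (k + 1)]
      have harith : k + 1 + t.countP p = k + (t.countP p + if p a then 1 else 0) := by
        simp [hp]; omega
      rw [harith]
    · have hstep :
          (if p a then
            let m_ := ((k : Int), pvPts k).1 + 1
            if m_ == 1 then (m_, ((k : Int), pvPts k).2 + 1) else (m_, ((k : Int), pvPts k).2 * 2)
          else ((k : Int), pvPts k)) = ((k : Int), pvPts k) := by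
        rw [if_neg hp]
      rw [hstep, ih k]
      have harith : k + t.countP p = k + (t.countP p + if p a then 1 else 0) := by
        simp [hp]
      rw [harith]

-- ===== VERDICT (by name: the statement is the Claim_ definition above) =====
theorem calculate_card_points_spec : Claim_equal_calculate_card_points := by
  intro w nc _
  unfold Spec_calculate_card_points calculate_card_points calculate_card_points_alt
  show (List.foldl _ ((0 : Int), (0 : Int)) nc).2 = _
  rw [show ((0 : Int), (0 : Int)) = (((0 : Nat) : Int), pvPts 0) from rfl,
    pvLoop (fun n => PySem.Set.contains (PySem.Set.ofList w) n) nc 0]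
  simp [pvPts]
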